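-- pv_equiv track=rewrite | github.com/SecretTarget/Tatami | plugins/sim/interpreters.py | interpretNumRevHexString
-- ===== SOURCE A (Python) =====
-- def interpretRevHexString(value):
--     txt = ""
--     for c in value:
--         if c == 0xff:
--                 break
--         txt += "%1x%1x" % (c%16, c>>4)
--     if len(txt) == 0:
--         return "No information"
--     return txt
--
-- def interpretNumRevHexString(value):
--     txt = interpretRevHexString(value)
--     number = ""
--     for c in txt:
--         if '0' <= c <= '9':
--             number += c
--         elif c == 'A':
--             number += '*'
--         elif c == 'B':
--             number += '#'
--         elif c == 'C':
--             number += '-'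
--         elif c == 'D':
--             number += '?'
--         else:
--             break
--     return number
-- ===== SOURCE B (Python) =====
-- def interpretNumRevHexString(value):
--     # One pass directly over the bytes: no intermediate hex string,
--     # no "No information" sentinel, no dead 'A'-'D' branches.
--     out = []
--     for c in value:
--         if c == 0xff:
--             break
--         stop = False
--         for ch in format(c % 16, 'x') + format(c >> 4, 'x'):
--             if '0' <= ch <= '9':
--                 out.append(ch)
--             else:
--                 stop = True
--                 break
--         if stop:
--             break
--     return ''.join(out)
-- ===== Notes on version B (the rewrite author's own statement) =====
-- stated objective: faster
-- what changed: B fuses A's two phases into one early-exiting pass over the bytes, collecting digit hex chars in a list joined once and stopping at the first non-digit, removing the intermediate quadratic string concatenation, the 'No information' sentinel and the dead 'A'-'D' branches.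
import Mathlib
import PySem

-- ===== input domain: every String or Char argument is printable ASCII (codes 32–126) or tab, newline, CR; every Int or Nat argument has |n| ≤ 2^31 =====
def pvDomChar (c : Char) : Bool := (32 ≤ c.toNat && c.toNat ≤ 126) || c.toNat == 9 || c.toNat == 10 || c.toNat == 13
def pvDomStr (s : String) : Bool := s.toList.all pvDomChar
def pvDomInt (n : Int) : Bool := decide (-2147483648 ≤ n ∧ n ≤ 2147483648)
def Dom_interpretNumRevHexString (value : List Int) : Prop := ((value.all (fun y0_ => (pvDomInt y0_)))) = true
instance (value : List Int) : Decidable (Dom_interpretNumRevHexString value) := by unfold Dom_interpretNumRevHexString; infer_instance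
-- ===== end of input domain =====

-- B fuses A's two phases into one pass over the bytes; objective: simpler (no sentinel, no dead branches).

-- shared hex formatting: Python's "%1x" % n / format(n, 'x') (lowercase, '-' prefix on negatives)
def pvHexDigit (d : Nat) : Char := if d < 10 then Char.ofNat (48 + d) else Char.ofNat (87 + d)

def pvNatHex (n : Nat) : List Char :=
  if h : n < 16 then [pvHexDigit n]
  else pvNatHex (n / 16) ++ [pvHexDigit (n % 16)]
decreasing_by exact Nat.div_lt_self (by omega) (by omega)

def pvIntHex (n : Int) : List Char :=
  if n < 0 then '-' :: pvNatHex n.natAbs else pvNatHex n.toNat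

-- ===== PORT A =====
-- loop of interpretRevHexString: break on 0xff, append "%1x%1x" % (c%16, c>>4)
def pvRevHexLoop : List Int → List Char
  | [] => []
  | c :: rest =>
    if c = 255 then []
    else (pvIntHex (PySem.Int.mod c 16) ++ pvIntHex (c >>> (4 : Nat))) ++ pvRevHexLoop rest

def interpretRevHexStringPort (value : List Int) : List Char :=
  let txt := pvRevHexLoop value
  if txt.length = 0 then "No information".toList else txt

-- second loop of A: keep digits, map 'A'..'D', else break
def pvNumLoop : List Char → List Char
  | [] => []
  | c :: rest =>
    if '0' ≤ c ∧ c ≤ '9' then c :: pvNumLoop rest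
    else if c = 'A' then '*' :: pvNumLoop rest
    else if c = 'B' then '#' :: pvNumLoop rest
    else if c = 'C' then '-' :: pvNumLoop rest
    else if c = 'D' then '?' :: pvNumLoop rest
    else []

def interpretNumRevHexString (value : List Int) : String :=
  String.mk (pvNumLoop (interpretRevHexStringPort value))

-- ===== PORT B =====
-- inner char loop of B: digits collected, first non-digit sets the stop flag
def pvScanDigits : List Char → List Char × Bool
  | [] => ([], false)
  | c :: rest =>
    if '0' ≤ c ∧ c ≤ '9' then
      let p := pvScanDigits rest
      (c :: p.1, p.2)
    else ([], true)

def pvAltLoop : List Int → List Char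
  | [] => []
  | c :: rest =>
    if c = 255 then []
    else
      let p := pvScanDigits (pvIntHex (PySem.Int.mod c 16) ++ pvIntHex (c >>> (4 : Nat)))
      if p.2 then p.1 else p.1 ++ pvAltLoop rest

def interpretNumRevHexString_alt (value : List Int) : String :=
  String.mk (pvAltLoop value)

-- ===== PRECONDITION & SPEC =====
def Spec_interpretNumRevHexString (value : List Int) (out : String) : Prop := out = interpretNumRevHexString_alt value
instance (value : List Int) (out : String) : Decidable (Spec_interpretNumRevHexString value out) := by unfold Spec_interpretNumRevHexString; infer_instance

-- ===== CLAIM (what is proved, stated in full; the proofs are below) =====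
def Claim_equal_interpretNumRevHexString : Prop := ∀ (value : List Int), Dom_interpretNumRevHexString value → Spec_interpretNumRevHexString value (interpretNumRevHexString value)

-- ===== LEMMAS AND PROOFS =====

-- a char A's filter never maps through the 'A'..'D' branches
def pvGood (c : Char) : Prop := c ≠ 'A' ∧ c ≠ 'B' ∧ c ≠ 'C' ∧ c ≠ 'D'

theorem pvHexDigit_good (d : Nat) (h : d < 16) : pvGood (pvHexDigit d) := by
  interval_cases d <;> exact ⟨by decide, by decide, by decide, by decide⟩

theorem pvNatHex_good (n : Nat) : ∀ ch ∈ pvNatHex n, pvGood ch := by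
  induction n using Nat.strong_induction_on with
  | _ n ih =>
    unfold pvNatHex
    split
    · intro ch h
      simp only [List.mem_singleton] at h
      subst h
      exact pvHexDigit_good _ ‹_›
    · intro ch h
      rcases List.mem_append.1 h with h | h
      · exact ih (n / 16) (Nat.div_lt_self (by omega) (by omega)) ch h
      · simp only [List.mem_singleton] at h
        subst h
        exact pvHexDigit_good _ (Nat.mod_lt _ (by omega))

theorem pvIntHex_good (n : Int) : ∀ ch ∈ pvIntHex n, pvGood ch := by
  unfold pvIntHex
  split
  · intro ch h
    rcases List.mem_cons.1 h with h | h
    · subst h; exact ⟨by decide, by decide, by decide, by decide⟩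
    · exact pvNatHex_good _ ch h
  · exact pvNatHex_good _

theorem pvNatHex_ne_nil (n : Nat) : pvNatHex n ≠ [] := by
  unfold pvNatHex
  split <;> simp

theorem pvIntHex_ne_nil (n : Int) : pvIntHex n ≠ [] := by
  unfold pvIntHex
  split
  · simp
  · exact pvNatHex_ne_nil _

theorem pvNumLoop_append (s t : List Char) (hg : ∀ ch ∈ s, pvGood ch) :
    pvNumLoop (s ++ t) =
      (pvScanDigits s).1 ++ (if (pvScanDigits s).2 then [] else pvNumLoop t) := by
  induction s with
  | nil => simp [pvScanDigits]
  | cons c s' ih =>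
    have hc : pvGood c := hg c (List.mem_cons_self ..)
    have hg' : ∀ ch ∈ s', pvGood ch := fun ch h => hg ch (List.mem_cons_of_mem _ h)
    by_cases hd : '0' ≤ c ∧ c ≤ '9'
    · simp only [List.cons_append, pvNumLoop, pvScanDigits, if_pos hd, ih hg']
    · obtain ⟨h1, h2, h3, h4⟩ := hc
      simp [pvNumLoop, pvScanDigits, hd, h1, h2, h3, h4]

theorem pvNumLoop_revHex (value : List Int) :
    pvNumLoop (pvRevHexLoop value) = pvAltLoop value := by
  induction value with
  | nil => rfl
  | cons c rest ih =>
    by_cases h255 : c = 255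
    · simp [pvRevHexLoop, pvAltLoop, h255, pvNumLoop]
    · have hg : ∀ ch ∈ pvIntHex (PySem.Int.mod c 16) ++ pvIntHex (c >>> (4 : Nat)), pvGood ch := by
        intro ch h
        rcases List.mem_append.1 h with h | h
        · exact pvIntHex_good _ ch h
        · exact pvIntHex_good _ ch h
      simp only [pvRevHexLoop, pvAltLoop, if_neg h255, List.append_assoc]
      rw [← List.append_assoc, pvNumLoop_append _ _ hg, ih]
      split <;> simp

theorem pvRevHexLoop_nil_altNil (value : List Int) (h : pvRevHexLoop value = []) :
    pvAltLoop value = [] := by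
  cases value with
  | nil => rfl
  | cons c rest =>
    by_cases h255 : c = 255
    · simp [pvAltLoop, h255]
    · exfalso
      simp only [pvRevHexLoop, if_neg h255] at h
      exact pvIntHex_ne_nil _ (List.append_eq_nil_iff.1 (List.append_eq_nil_iff.1 h).1).1

-- ===== VERDICT (by name: the statement is the Claim_ definition above) =====
theorem interpretNumRevHexString_spec : Claim_equal_interpretNumRevHexString := by
  intro value _
  show String.mk (pvNumLoop (interpretRevHexStringPort value)) = _
  rw [show interpretRevHexStringPort value
        = if (pvRevHexLoop value).length = 0 then "No information".toList else pvRevHexLoop value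
      from rfl]
  by_cases h : pvRevHexLoop value = []
  · rw [if_pos (by simp [h]), interpretNumRevHexString_alt, pvRevHexLoop_nil_altNil value h]
    decide
  · rw [if_neg (by simp [h]), pvNumLoop_revHex]
    rfl
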